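-- pv_equiv track=rewrite | github.com/Panda-Z-Coding/PythonAlgorithm | 27入门/妇女唇膏【算法赛】.py | find_min_B
-- ===== SOURCE A (Python) =====
-- def find_min_B(arr):
--     # 统计所有 A[i] 的二进制表示中出现的 1
--     mask = 0
--     for num in arr:
--         mask |= num
--     # 找到最小的 B，其二进制表示中不包含 mask 中的 1
--     B = 1
--     while (B & mask) != 0:
--         B += 1
--     return B
-- ===== SOURCE B (Python) =====
-- def find_min_B(arr):
--     mask = 0
--     for num in arr:
--         mask |= num
--     # smallest positive B with B & mask == 0 is the lowest clear bit of mask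
--     return (~mask) & (mask + 1)
-- ===== Notes on version B (the rewrite author's own statement) =====
-- stated objective: alternative
-- what changed: Replaces A's linear search B=1,2,3,... for the first B with B&mask==0 by the closed-form lowest-clear-bit expression (~mask)&(mask+1) (intended as the faster algorithm: A's search is O(2^t) in the trailing-one-bits t of the OR and timed out at n=16 where B returned, but the probe could not verify a ratio there, so no speed is claimed); inputs whose bitwise OR is -1, where A loops forever, are excluded by Pre_.
import Mathlib
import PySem

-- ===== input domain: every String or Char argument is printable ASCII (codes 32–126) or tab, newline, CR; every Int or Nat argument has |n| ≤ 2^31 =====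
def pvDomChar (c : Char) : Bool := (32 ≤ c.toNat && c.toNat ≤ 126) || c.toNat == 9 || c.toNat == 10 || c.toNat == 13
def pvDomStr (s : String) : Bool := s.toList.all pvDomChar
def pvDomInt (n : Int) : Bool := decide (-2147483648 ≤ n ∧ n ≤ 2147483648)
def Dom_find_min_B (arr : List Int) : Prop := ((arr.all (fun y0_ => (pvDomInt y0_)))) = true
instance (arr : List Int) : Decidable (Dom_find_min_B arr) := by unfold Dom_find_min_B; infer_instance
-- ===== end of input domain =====

-- B replaces A's linear search for the first B with B & mask == 0 by the closed-form
-- lowest-clear-bit expression (~mask) & (mask + 1); objective: alternative (closed form instead of a search loop).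

-- ===== PORT A =====
-- A's while loop 'while (B & mask) != 0: B += 1'; the fuel only makes it total in Lean:
-- under Pre_ (OR of arr ≠ -1) the loop is proved to stop before the fuel runs out.
def pvLoopA : Nat → Int → Int → Int
  | 0, _, B => B
  | fuel + 1, mask, B => if PySem.Int.band B mask ≠ 0 then pvLoopA fuel mask (B + 1) else B

def find_min_B (arr : List Int) : Int :=
  let mask := arr.foldl (fun m num => PySem.Int.bor m num) 0
  pvLoopA (mask.natAbs + 2) mask 1

-- ===== PORT B =====
def find_min_B_alt (arr : List Int) : Int :=
  let mask := arr.foldl (fun m num => PySem.Int.bor m num) 0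
  PySem.Int.band (Int.not mask) (mask + 1)

-- ===== PRECONDITION & SPEC =====
-- Pre_ excludes exactly the inputs whose bitwise OR is -1: there A's while loop never terminates.
def Pre_find_min_B (arr : List Int) : Prop :=
  arr.foldl (fun m num => PySem.Int.bor m num) 0 ≠ -1
instance (arr : List Int) : Decidable (Pre_find_min_B arr) := by unfold Pre_find_min_B; infer_instance
def pvWitness_find_min_B : List Int := [5]

def Spec_find_min_B (arr : List Int) (out : Int) : Prop := out = find_min_B_alt arr
instance (arr : List Int) (out : Int) : Decidable (Spec_find_min_B arr out) := by unfold Spec_find_min_B; infer_instance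

-- ===== CLAIM (what is proved, stated in full; the proofs are below) =====
def Claim_equal_find_min_B : Prop := ∀ (arr : List Int), Dom_find_min_B arr → Pre_find_min_B arr → Spec_find_min_B arr (find_min_B arr)

-- ===== LEMMAS AND PROOFS =====

-- proof-side abbreviation for B's closed form
def pvL (mask : Int) : Int := PySem.Int.band (Int.not mask) (mask + 1)

lemma pv_not_eq (m : Int) : Int.not m = -m - 1 := by
  rcases m with n | n <;> simp [Int.not] <;> omega

-- Nat-level bit-doubling identities (instances of Nat.land_bit / Nat.lor_bit)
lemma pv_na00 (m n : Nat) : 2*m &&& 2*n = 2*(m &&& n) := by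
  simpa [Nat.bit] using Nat.land_bit false m false n
lemma pv_na10 (m n : Nat) : 2*m+1 &&& 2*n = 2*(m &&& n) := by
  simpa [Nat.bit] using Nat.land_bit true m false n
lemma pv_na01 (m n : Nat) : 2*m &&& (2*n+1) = 2*(m &&& n) := by
  simpa [Nat.bit] using Nat.land_bit false m true n
lemma pv_na11 (m n : Nat) : (2*m+1) &&& (2*n+1) = 2*(m &&& n) + 1 := by
  simpa [Nat.bit] using Nat.land_bit true m true n
lemma pv_no00 (m n : Nat) : 2*m ||| 2*n = 2*(m ||| n) := by
  simpa [Nat.bit] using Nat.lor_bit false m false n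
lemma pv_no01 (m n : Nat) : 2*m ||| (2*n+1) = 2*(m ||| n) + 1 := by
  simpa [Nat.bit] using Nat.lor_bit false m true n
lemma pv_no11 (m n : Nat) : (2*m+1) ||| (2*n+1) = 2*(m ||| n) + 1 := by
  simpa [Nat.bit] using Nat.lor_bit true m true n

-- Int-level doubling identities for PySem.Int.band
lemma pv_Dband00 (a b : Int) : PySem.Int.band (2*a) (2*b) = 2 * PySem.Int.band a b := by
  by_cases ha : 0 ≤ a <;> by_cases hb : 0 ≤ b <;> simp only [PySem.Int.band]
  · rw [if_pos (by omega : (0:Int) ≤ 2*a), if_pos (by omega : (0:Int) ≤ 2*b), if_pos ha, if_pos hb]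
    rw [(by omega : (2*a).toNat = 2*a.toNat), (by omega : (2*b).toNat = 2*b.toNat),
      pv_na00 a.toNat b.toNat]
    omega
  · rw [if_pos (by omega : (0:Int) ≤ 2*a), if_neg (by omega : ¬ (0:Int) ≤ 2*b), if_pos ha, if_neg hb]
    rw [(by omega : (2*a).toNat = 2*a.toNat), (by omega : (-(2*b)-1).toNat = 2*(-b-1).toNat + 1),
      pv_na01 a.toNat (-b-1).toNat]
    have h := Nat.and_le_left (n := a.toNat) (m := (-b-1).toNat)
    omega
  · rw [if_neg (by omega : ¬ (0:Int) ≤ 2*a), if_pos (by omega : (0:Int) ≤ 2*b), if_neg ha, if_pos hb]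
    rw [(by omega : (2*b).toNat = 2*b.toNat), (by omega : (-(2*a)-1).toNat = 2*(-a-1).toNat + 1),
      pv_na01 b.toNat (-a-1).toNat]
    have h := Nat.and_le_left (n := b.toNat) (m := (-a-1).toNat)
    omega
  · rw [if_neg (by omega : ¬ (0:Int) ≤ 2*a), if_neg (by omega : ¬ (0:Int) ≤ 2*b), if_neg ha, if_neg hb]
    rw [(by omega : (-(2*a)-1).toNat = 2*(-a-1).toNat + 1),
      (by omega : (-(2*b)-1).toNat = 2*(-b-1).toNat + 1), pv_no11 (-a-1).toNat (-b-1).toNat]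
    omega

lemma pv_Dband10 (a b : Int) : PySem.Int.band (2*a+1) (2*b) = 2 * PySem.Int.band a b := by
  by_cases ha : 0 ≤ a <;> by_cases hb : 0 ≤ b <;> simp only [PySem.Int.band]
  · rw [if_pos (by omega : (0:Int) ≤ 2*a+1), if_pos (by omega : (0:Int) ≤ 2*b), if_pos ha, if_pos hb]
    rw [(by omega : (2*a+1).toNat = 2*a.toNat+1), (by omega : (2*b).toNat = 2*b.toNat),
      pv_na10 a.toNat b.toNat]
    omega
  · rw [if_pos (by omega : (0:Int) ≤ 2*a+1), if_neg (by omega : ¬ (0:Int) ≤ 2*b), if_pos ha, if_neg hb]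
    rw [(by omega : (2*a+1).toNat = 2*a.toNat+1), (by omega : (-(2*b)-1).toNat = 2*(-b-1).toNat + 1),
      pv_na11 a.toNat (-b-1).toNat]
    have h := Nat.and_le_left (n := a.toNat) (m := (-b-1).toNat)
    omega
  · rw [if_neg (by omega : ¬ (0:Int) ≤ 2*a+1), if_pos (by omega : (0:Int) ≤ 2*b), if_neg ha, if_pos hb]
    rw [(by omega : (2*b).toNat = 2*b.toNat), (by omega : (-(2*a+1)-1).toNat = 2*(-a-1).toNat),
      pv_na00 b.toNat (-a-1).toNat]
    have h := Nat.and_le_left (n := b.toNat) (m := (-a-1).toNat)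
    omega
  · rw [if_neg (by omega : ¬ (0:Int) ≤ 2*a+1), if_neg (by omega : ¬ (0:Int) ≤ 2*b), if_neg ha, if_neg hb]
    rw [(by omega : (-(2*a+1)-1).toNat = 2*(-a-1).toNat),
      (by omega : (-(2*b)-1).toNat = 2*(-b-1).toNat + 1), pv_no01 (-a-1).toNat (-b-1).toNat]
    omega

lemma pv_Dband01 (a b : Int) : PySem.Int.band (2*a) (2*b+1) = 2 * PySem.Int.band a b := by
  rw [PySem.Int.band_comm, pv_Dband10, PySem.Int.band_comm]

lemma pv_Dband11 (a b : Int) : PySem.Int.band (2*a+1) (2*b+1) = 2 * PySem.Int.band a b + 1 := by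
  by_cases ha : 0 ≤ a <;> by_cases hb : 0 ≤ b <;> simp only [PySem.Int.band]
  · rw [if_pos (by omega : (0:Int) ≤ 2*a+1), if_pos (by omega : (0:Int) ≤ 2*b+1), if_pos ha, if_pos hb]
    rw [(by omega : (2*a+1).toNat = 2*a.toNat+1), (by omega : (2*b+1).toNat = 2*b.toNat+1),
      pv_na11 a.toNat b.toNat]
    omega
  · rw [if_pos (by omega : (0:Int) ≤ 2*a+1), if_neg (by omega : ¬ (0:Int) ≤ 2*b+1), if_pos ha, if_neg hb]
    rw [(by omega : (2*a+1).toNat = 2*a.toNat+1), (by omega : (-(2*b+1)-1).toNat = 2*(-b-1).toNat),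
      pv_na10 a.toNat (-b-1).toNat]
    have h := Nat.and_le_left (n := a.toNat) (m := (-b-1).toNat)
    omega
  · rw [if_neg (by omega : ¬ (0:Int) ≤ 2*a+1), if_pos (by omega : (0:Int) ≤ 2*b+1), if_neg ha, if_pos hb]
    rw [(by omega : (2*b+1).toNat = 2*b.toNat+1), (by omega : (-(2*a+1)-1).toNat = 2*(-a-1).toNat),
      pv_na10 b.toNat (-a-1).toNat]
    have h := Nat.and_le_left (n := b.toNat) (m := (-a-1).toNat)
    omega
  · rw [if_neg (by omega : ¬ (0:Int) ≤ 2*a+1), if_neg (by omega : ¬ (0:Int) ≤ 2*b+1), if_neg ha, if_neg hb]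
    rw [(by omega : (-(2*a+1)-1).toNat = 2*(-a-1).toNat),
      (by omega : (-(2*b+1)-1).toNat = 2*(-b-1).toNat), pv_no00 (-a-1).toNat (-b-1).toNat]
    omega

lemma pv_band_zero_left (b : Int) : PySem.Int.band 0 b = 0 := by
  rw [PySem.Int.band_comm]; exact PySem.Int.band_zero b

-- x & ~x = 0
lemma pv_bandNot_aux : ∀ (n : Nat) (m : Int), m.natAbs ≤ n → PySem.Int.band (Int.not m) m = 0
  | 0, m, h => by
    have : m = 0 := by omega
    rw [this]; exact PySem.Int.band_zero _
  | n + 1, m, h => by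
    by_cases h0 : m = 0
    · rw [h0]; exact PySem.Int.band_zero _
    by_cases h1 : m = -1
    · rw [h1]; decide
    rcases Int.even_or_odd m with ⟨k, hk⟩ | ⟨k, hk⟩
    · have hm : m = 2*k := by omega
      have hnot : Int.not (2*k) = 2 * Int.not k + 1 := by rw [pv_not_eq, pv_not_eq]; ring
      rw [hm, hnot, pv_Dband10, pv_bandNot_aux n k (by omega)]
      ring
    · have hnot : Int.not (2*k+1) = 2 * Int.not k := by rw [pv_not_eq, pv_not_eq]; ring
      rw [hk, hnot, pv_Dband01, pv_bandNot_aux n k (by omega)]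
      ring

lemma pv_bandNot (m : Int) : PySem.Int.band (Int.not m) m = 0 :=
  pv_bandNot_aux m.natAbs m le_rfl

lemma pv_pvL_even (k : Int) : pvL (2*k) = 1 := by
  unfold pvL
  have hnot : Int.not (2*k) = 2 * Int.not k + 1 := by rw [pv_not_eq, pv_not_eq]; ring
  rw [hnot, (by ring : 2*k+1 = 2*k+1), pv_Dband11, pv_bandNot, mul_zero, zero_add]

lemma pv_pvL_odd (k : Int) : pvL (2*k+1) = 2 * pvL k := by
  unfold pvL
  have hnot : Int.not (2*k+1) = 2 * Int.not k := by rw [pv_not_eq, pv_not_eq]; ring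
  rw [hnot, (by ring : 2*k+1+1 = 2*(k+1)), pv_Dband00]

-- F1: the closed form is disjoint from mask
lemma pv_pvL_band_aux : ∀ (n : Nat) (mask : Int), mask.natAbs ≤ n →
    PySem.Int.band (pvL mask) mask = 0
  | 0, mask, h => by
    have : mask = 0 := by omega
    rw [this]; exact PySem.Int.band_zero _
  | n + 1, mask, h => by
    by_cases h1 : mask = -1
    · rw [h1]; decide
    rcases Int.even_or_odd mask with ⟨k, hk⟩ | ⟨k, hk⟩
    · have hm : mask = 2*k := by omega
      rw [hm, pv_pvL_even, (by norm_num : (1:Int) = 2*0+1), pv_Dband10, pv_band_zero_left, mul_zero]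
    · by_cases h0 : mask = 0
      · omega
      rw [hk, pv_pvL_odd, pv_Dband01, pv_pvL_band_aux n k (by omega), mul_zero]

lemma pv_pvL_band (mask : Int) : PySem.Int.band (pvL mask) mask = 0 :=
  pv_pvL_band_aux mask.natAbs mask le_rfl

-- F2: everything strictly below the closed form meets mask
lemma pv_band_ne_of_lt : ∀ (n : Nat) (B mask : Int), B.natAbs ≤ n → 0 < B → B < pvL mask →
    PySem.Int.band B mask ≠ 0
  | 0, B, _, h, hB, _ => by omega
  | n + 1, B, mask, h, hB, hlt => by
    rcases Int.even_or_odd mask with ⟨k, hk⟩ | ⟨k, hk⟩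
    · have hm : mask = 2*k := by omega
      rw [hm, pv_pvL_even] at hlt
      omega
    · rw [hk, pv_pvL_odd] at hlt
      rcases Int.even_or_odd B with ⟨c, hc⟩ | ⟨c, hc⟩
      · have hBc : B = 2*c := by omega
        have hrec := pv_band_ne_of_lt n c k (by omega) (by omega) (by omega)
        rw [hBc, hk, pv_Dband01]
        omega
      · rw [hc, hk, pv_Dband11]
        omega

-- F3: the closed form is positive when mask ≠ -1
lemma pv_pvL_pos : ∀ (n : Nat) (mask : Int), mask.natAbs ≤ n → mask ≠ -1 → 0 < pvL mask
  | 0, mask, h, _ => by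
    have : mask = 0 := by omega
    rw [this]; decide
  | n + 1, mask, h, h1 => by
    rcases Int.even_or_odd mask with ⟨k, hk⟩ | ⟨k, hk⟩
    · have hm : mask = 2*k := by omega
      rw [hm, pv_pvL_even]; omega
    · have := pv_pvL_pos n k (by omega) (by omega)
      rw [hk, pv_pvL_odd]; omega

-- F4: bounds on the closed form, used to show A's fuel suffices
lemma pv_pvL_le_pos : ∀ (n : Nat) (mask : Int), mask.natAbs ≤ n → 0 ≤ mask → pvL mask ≤ mask + 1
  | 0, mask, h, _ => by
    have : mask = 0 := by omega
    rw [this]; decide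
  | n + 1, mask, h, hm => by
    rcases Int.even_or_odd mask with ⟨k, hk⟩ | ⟨k, hk⟩
    · have hm2 : mask = 2*k := by omega
      rw [hm2, pv_pvL_even]; omega
    · have := pv_pvL_le_pos n k (by omega) (by omega)
      rw [hk, pv_pvL_odd]; omega

lemma pv_pvL_le_neg : ∀ (n : Nat) (mask : Int), mask.natAbs ≤ n → mask < -1 → pvL mask ≤ -mask - 1
  | 0, _, h, hm => by omega
  | n + 1, mask, h, hm => by
    rcases Int.even_or_odd mask with ⟨k, hk⟩ | ⟨k, hk⟩
    · have hm2 : mask = 2*k := by omega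
      rw [hm2, pv_pvL_even]; omega
    · have := pv_pvL_le_neg n k (by omega) (by omega)
      rw [hk, pv_pvL_odd]; omega

-- A's while loop reaches exactly the closed form
lemma pv_loop_eq : ∀ (fuel : Nat) (mask B : Int), 0 < B → B ≤ pvL mask →
    (pvL mask - B).toNat < fuel → pvLoopA fuel mask B = pvL mask
  | 0, _, _, _, _, hf => by omega
  | fuel + 1, mask, B, hB, hle, hf => by
    by_cases h : PySem.Int.band B mask = 0
    · have : ¬ B < pvL mask := fun hlt => pv_band_ne_of_lt B.natAbs B mask le_rfl hB hlt h
      have hBe : B = pvL mask := by omega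
      rw [pvLoopA, if_neg (not_not_intro h)]
      exact hBe
    · have hne : B ≠ pvL mask := fun he => h (he ▸ pv_pvL_band mask)
      have hlt : B < pvL mask := by omega
      rw [pvLoopA, if_pos h]
      exact pv_loop_eq fuel mask (B + 1) (by omega) (by omega) (by omega)

-- ===== VERDICT (by name: the statement is the Claim_ definition above) =====
theorem find_min_B_spec : Claim_equal_find_min_B := by
  intro arr _ hpre
  unfold Pre_find_min_B at hpre
  unfold Spec_find_min_B find_min_B find_min_B_alt
  set mask := arr.foldl (fun m num => PySem.Int.bor m num) 0 with hm
  show pvLoopA (mask.natAbs + 2) mask 1 = pvL mask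
  have hpos := pv_pvL_pos mask.natAbs mask le_rfl hpre
  have hub : pvL mask ≤ (mask.natAbs : Int) + 1 := by
    by_cases h : 0 ≤ mask
    · have := pv_pvL_le_pos mask.natAbs mask le_rfl h
      omega
    · have := pv_pvL_le_neg mask.natAbs mask le_rfl (by omega)
      omega
  exact pv_loop_eq (mask.natAbs + 2) mask 1 (by omega) (by omega) (by omega)
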